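-- pv_equiv track=rewrite | github.com/afasseeh/OptiDx | optidx_package/optidx/constraints.py | _derive_sample_flags
-- ===== SOURCE A (Python) =====
-- from typing import Any, Dict, Iterable, Mapping
--
-- SAMPLE_FLAG_ALIASES = {
--     'none': {'none', 'no sample', 'not applicable', ''},
--     'blood': {'blood', 'serum', 'plasma', 'fingerstick'},
--     'urine': {'urine'},
--     'stool': {'stool', 'feces', 'faeces'},
--     'sputum': {'sputum'},
--     'nasal_swab': {'nasal swab', 'nasopharyngeal swab', 'swab'},
--     'imaging': {'imaging', 'x-ray', 'xray', 'ct', 'mri', 'ultrasound', 'radiograph'},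
-- }
--
-- def _flatten_samples(sample_types: Iterable[str]) -> set[str]:
--     return {str(sample).strip().lower() for sample in sample_types if str(sample).strip()}
--
-- def _derive_sample_flags(sample_types: list[str], raw: Mapping[str, Any]) -> Dict[str, bool]:
--     normalized = _flatten_samples(sample_types)
--     return {
--         'none': bool(raw.get('sample_none', False)) or normalized == set() or any(sample in normalized for sample in SAMPLE_FLAG_ALIASES['none']),
--         'blood': bool(raw.get('sample_blood', False)) or any(sample in normalized for sample in SAMPLE_FLAG_ALIASES['blood']),
--         'urine': bool(raw.get('sample_urine', False)) or any(sample in normalized for sample in SAMPLE_FLAG_ALIASES['urine']),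
--         'stool': bool(raw.get('sample_stool', False)) or any(sample in normalized for sample in SAMPLE_FLAG_ALIASES['stool']),
--         'sputum': bool(raw.get('sample_sputum', False)) or any(sample in normalized for sample in SAMPLE_FLAG_ALIASES['sputum']),
--         'nasal_swab': bool(raw.get('sample_nasal_swab', False)) or any(sample in normalized for sample in SAMPLE_FLAG_ALIASES['nasal_swab']),
--         'imaging': bool(raw.get('sample_imaging', False)) or any(sample in normalized for sample in SAMPLE_FLAG_ALIASES['imaging']),
--     }
-- ===== SOURCE B (Python) =====
-- SAMPLE_FLAG_ALIASES = {
--     'none': {'none', 'no sample', 'not applicable', ''},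
--     'blood': {'blood', 'serum', 'plasma', 'fingerstick'},
--     'urine': {'urine'},
--     'stool': {'stool', 'feces', 'faeces'},
--     'sputum': {'sputum'},
--     'nasal_swab': {'nasal swab', 'nasopharyngeal swab', 'swab'},
--     'imaging': {'imaging', 'x-ray', 'xray', 'ct', 'mri', 'ultrasound', 'radiograph'},
-- }
--
-- # Inverse index: alias -> flag name, built once; then ONE pass over the data.
-- _ALIAS_INDEX = {alias: flag for flag, aliases in SAMPLE_FLAG_ALIASES.items() for alias in aliases}
--
--
-- def _derive_sample_flags(sample_types, raw):
--     normalized = {str(s).strip().lower() for s in sample_types if str(s).strip()}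
--     hits = {_ALIAS_INDEX[s] for s in normalized if s in _ALIAS_INDEX}
--     if not normalized:
--         hits.add('none')
--     return {flag: bool(raw.get('sample_' + flag, False)) or flag in hits
--             for flag in SAMPLE_FLAG_ALIASES}
-- ===== Notes on version B (the rewrite author's own statement) =====
-- stated objective: alternative
-- what changed: Replaces A's seven per-flag scans over alias sets (membership-testing each alias against the normalized set) by a single inverse alias-to-flag index built once, one dispatch pass over the normalized samples collecting the set of hit flags, and an emptiness fix-up for 'none'.
import Mathlib
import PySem

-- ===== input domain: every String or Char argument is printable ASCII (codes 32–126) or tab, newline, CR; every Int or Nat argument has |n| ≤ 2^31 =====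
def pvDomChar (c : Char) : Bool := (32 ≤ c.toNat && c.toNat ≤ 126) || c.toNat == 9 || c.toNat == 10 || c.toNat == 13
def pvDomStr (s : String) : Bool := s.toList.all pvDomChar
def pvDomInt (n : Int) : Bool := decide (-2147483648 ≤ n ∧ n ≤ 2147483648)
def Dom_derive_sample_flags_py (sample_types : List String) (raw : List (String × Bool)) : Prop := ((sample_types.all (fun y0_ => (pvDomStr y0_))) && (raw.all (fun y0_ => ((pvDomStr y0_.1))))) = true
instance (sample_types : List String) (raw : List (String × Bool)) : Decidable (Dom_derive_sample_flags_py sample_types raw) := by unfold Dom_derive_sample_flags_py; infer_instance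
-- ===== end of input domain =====

-- B replaces A's seven per-flag alias scans by one inverse alias→flag index and a single
-- dispatch pass over the normalized sample set (objective: alternative decomposition).

-- ===== PORT A =====
-- SAMPLE_FLAG_ALIASES, one list per flag (A only tests membership, so order is immaterial)
def pvAliasesNone : List String := ["none", "no sample", "not applicable", ""]
def pvAliasesBlood : List String := ["blood", "serum", "plasma", "fingerstick"]
def pvAliasesUrine : List String := ["urine"]
def pvAliasesStool : List String := ["stool", "feces", "faeces"]
def pvAliasesSputum : List String := ["sputum"]
def pvAliasesNasal : List String := ["nasal swab", "nasopharyngeal swab", "swab"]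
def pvAliasesImaging : List String := ["imaging", "x-ray", "xray", "ct", "mri", "ultrasound", "radiograph"]

-- _flatten_samples: {str(sample).strip().lower() for sample in sample_types if str(sample).strip()}
def pvFlattenSamples (sample_types : List String) : PySem.Set String :=
  PySem.Set.ofList ((sample_types.filter (fun s => !(PySem.Str.strip s == ""))).map
    (fun s => PySem.Str.lower (PySem.Str.strip s)))

def derive_sample_flags_py (sample_types : List String) (raw : List (String × Bool)) : List (String × Bool) :=
  let normalized := pvFlattenSamples sample_types
  let d := PySem.Dict.mk raw
  [("none", d.getD "sample_none" false || PySem.Set.equal normalized PySem.Set.empty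
      || pvAliasesNone.any (fun a => PySem.Set.contains normalized a)),
   ("blood", d.getD "sample_blood" false || pvAliasesBlood.any (fun a => PySem.Set.contains normalized a)),
   ("urine", d.getD "sample_urine" false || pvAliasesUrine.any (fun a => PySem.Set.contains normalized a)),
   ("stool", d.getD "sample_stool" false || pvAliasesStool.any (fun a => PySem.Set.contains normalized a)),
   ("sputum", d.getD "sample_sputum" false || pvAliasesSputum.any (fun a => PySem.Set.contains normalized a)),
   ("nasal_swab", d.getD "sample_nasal_swab" false || pvAliasesNasal.any (fun a => PySem.Set.contains normalized a)),
   ("imaging", d.getD "sample_imaging" false || pvAliasesImaging.any (fun a => PySem.Set.contains normalized a))]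

-- ===== PORT B =====
-- _ALIAS_INDEX: the flattened alias → flag pairs of SAMPLE_FLAG_ALIASES (all alias keys distinct)
def pvIndexPairs : List (String × String) :=
  [("none", "none"), ("no sample", "none"), ("not applicable", "none"), ("", "none"),
   ("blood", "blood"), ("serum", "blood"), ("plasma", "blood"), ("fingerstick", "blood"),
   ("urine", "urine"),
   ("stool", "stool"), ("feces", "stool"), ("faeces", "stool"),
   ("sputum", "sputum"),
   ("nasal swab", "nasal_swab"), ("nasopharyngeal swab", "nasal_swab"), ("swab", "nasal_swab"),
   ("imaging", "imaging"), ("x-ray", "imaging"), ("xray", "imaging"), ("ct", "imaging"),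
   ("mri", "imaging"), ("ultrasound", "imaging"), ("radiograph", "imaging")]

def pvAliasIndex : PySem.Dict String String := PySem.Dict.ofList pvIndexPairs

def pvFlagNames : List String := ["none", "blood", "urine", "stool", "sputum", "nasal_swab", "imaging"]

def derive_sample_flags_py_alt (sample_types : List String) (raw : List (String × Bool)) : List (String × Bool) :=
  let normalized : PySem.Set String :=
    PySem.Set.ofList ((sample_types.filter (fun s => !(PySem.Str.strip s == ""))).map
      (fun s => PySem.Str.lower (PySem.Str.strip s)))
  -- {_ALIAS_INDEX[s] for s in normalized if s in _ALIAS_INDEX}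
  let hits0 : PySem.Set String := PySem.Set.ofList (normalized.filterMap (fun s => pvAliasIndex.get? s))
  -- if not normalized: hits.add('none')
  let hits : PySem.Set String :=
    if PySem.Set.equal normalized PySem.Set.empty then PySem.Set.add hits0 "none" else hits0
  let d := PySem.Dict.mk raw
  pvFlagNames.map (fun flag => (flag, d.getD ("sample_" ++ flag) false || PySem.Set.contains hits flag))

-- ===== PRECONDITION & SPEC =====
def Spec_derive_sample_flags_py (sample_types : List String) (raw : List (String × Bool)) (out : List (String × Bool)) : Prop := out = derive_sample_flags_py_alt sample_types raw
instance (sample_types : List String) (raw : List (String × Bool)) (out : List (String × Bool)) : Decidable (Spec_derive_sample_flags_py sample_types raw out) := by unfold Spec_derive_sample_flags_py; infer_instance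

-- ===== CLAIM (what is proved, stated in full; the proofs are below) =====
def Claim_equal_derive_sample_flags_py : Prop := ∀ (sample_types : List String) (raw : List (String × Bool)), Dom_derive_sample_flags_py sample_types raw → Spec_derive_sample_flags_py sample_types raw (derive_sample_flags_py sample_types raw)

-- ===== LEMMAS AND PROOFS =====

-- ofList keeps every pair because the 23 alias keys are distinct
theorem pvAliasIndex_eq : pvAliasIndex = PySem.Dict.mk pvIndexPairs := by decide

-- first-match lookup in an association list with distinct keys is pair membership
theorem pvGet_mk_iff (l : List (String × String)) (h : (l.map Prod.fst).Nodup) (s f : String) :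
    (PySem.Dict.mk l).get? s = some f ↔ (s, f) ∈ l := by
  induction l with
  | nil => simp [PySem.Dict.get?]
  | cons p rest ih =>
    obtain ⟨k, v⟩ := p
    rw [PySem.Dict.get?_mk_cons]
    simp only [List.map_cons, List.nodup_cons] at h
    by_cases hk : k = s
    · subst hk
      simp only [beq_self_eq_true, if_true, Option.some.injEq, List.mem_cons, Prod.mk.injEq]
      constructor
      · intro hv; exact Or.inl ⟨trivial, hv.symm⟩
      · rintro (⟨-, hv⟩ | hmem)
        · exact hv.symm
        · exact absurd (List.mem_map_of_mem (f := Prod.fst) hmem) h.1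
    · simp only [beq_iff_eq, hk, if_false, List.mem_cons, Prod.mk.injEq, ih h.2]
      constructor
      · exact Or.inr
      · rintro (⟨hs, -⟩ | hmem)
        · exact absurd hs.symm hk
        · exact hmem

theorem pvPairMem (l : List (String × String)) (s f : String) :
    (s, f) ∈ l ↔ s ∈ (l.filter (fun p => p.2 == f)).map Prod.fst := by
  simp only [List.mem_map, List.mem_filter, beq_iff_eq]
  constructor
  · intro hm; exact ⟨(s, f), ⟨hm, rfl⟩, rfl⟩
  · rintro ⟨⟨a, b⟩, ⟨hm, hb⟩, ha⟩
    cases ha; cases hb; exact hm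

-- the inverse index inverts the alias table, flag by flag
theorem pvIndex_none (s : String) : pvAliasIndex.get? s = some "none" ↔ s ∈ pvAliasesNone := by
  rw [pvAliasIndex_eq, pvGet_mk_iff _ (by decide), pvPairMem,
    show (pvIndexPairs.filter (fun p => p.2 == "none")).map Prod.fst = pvAliasesNone from by decide]

theorem pvIndex_blood (s : String) : pvAliasIndex.get? s = some "blood" ↔ s ∈ pvAliasesBlood := by
  rw [pvAliasIndex_eq, pvGet_mk_iff _ (by decide), pvPairMem,
    show (pvIndexPairs.filter (fun p => p.2 == "blood")).map Prod.fst = pvAliasesBlood from by decide]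

theorem pvIndex_urine (s : String) : pvAliasIndex.get? s = some "urine" ↔ s ∈ pvAliasesUrine := by
  rw [pvAliasIndex_eq, pvGet_mk_iff _ (by decide), pvPairMem,
    show (pvIndexPairs.filter (fun p => p.2 == "urine")).map Prod.fst = pvAliasesUrine from by decide]

theorem pvIndex_stool (s : String) : pvAliasIndex.get? s = some "stool" ↔ s ∈ pvAliasesStool := by
  rw [pvAliasIndex_eq, pvGet_mk_iff _ (by decide), pvPairMem,
    show (pvIndexPairs.filter (fun p => p.2 == "stool")).map Prod.fst = pvAliasesStool from by decide]

theorem pvIndex_sputum (s : String) : pvAliasIndex.get? s = some "sputum" ↔ s ∈ pvAliasesSputum := by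
  rw [pvAliasIndex_eq, pvGet_mk_iff _ (by decide), pvPairMem,
    show (pvIndexPairs.filter (fun p => p.2 == "sputum")).map Prod.fst = pvAliasesSputum from by decide]

theorem pvIndex_nasal (s : String) : pvAliasIndex.get? s = some "nasal_swab" ↔ s ∈ pvAliasesNasal := by
  rw [pvAliasIndex_eq, pvGet_mk_iff _ (by decide), pvPairMem,
    show (pvIndexPairs.filter (fun p => p.2 == "nasal_swab")).map Prod.fst = pvAliasesNasal from by decide]

theorem pvIndex_imaging (s : String) : pvAliasIndex.get? s = some "imaging" ↔ s ∈ pvAliasesImaging := by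
  rw [pvAliasIndex_eq, pvGet_mk_iff _ (by decide), pvPairMem,
    show (pvIndexPairs.filter (fun p => p.2 == "imaging")).map Prod.fst = pvAliasesImaging from by decide]

-- dispatching every sample through the index hits flag f exactly when some alias of f is a sample
theorem pvHits_eq (N : List String) (f : String) (aliases : List String)
    (h : ∀ s, pvAliasIndex.get? s = some f ↔ s ∈ aliases) :
    PySem.Set.contains (PySem.Set.ofList (N.filterMap (fun s => pvAliasIndex.get? s))) f
      = aliases.any (fun a => PySem.Set.contains N a) := by
  rw [Bool.eq_iff_iff]
  simp only [PySem.Set.contains_eq_listContains, List.contains_eq_mem, decide_eq_true_eq,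
    List.any_eq_true, PySem.Set.mem_ofList, List.mem_filterMap, h]
  constructor
  · rintro ⟨s, hs, hsf⟩; exact ⟨s, hsf, hs⟩
  · rintro ⟨a, ha, haN⟩; exact ⟨a, haN, ha⟩

-- Python's  s == set()  is emptiness
theorem pvEqualEmpty (N : PySem.Set String) :
    (PySem.Set.equal N PySem.Set.empty = true) ↔ N = [] := by
  simp only [PySem.Set.equal, PySem.Set.issubset, PySem.Set.empty,
    PySem.Set.contains_eq_listContains, List.contains_eq_mem, List.not_mem_nil, decide_false,
    List.all_nil, Bool.and_true, List.all_eq_true, Bool.false_eq_true, imp_false]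
  exact List.eq_nil_iff_forall_not_mem.symm

-- ===== VERDICT (by name: the statement is the Claim_ definition above) =====
theorem derive_sample_flags_py_spec : Claim_equal_derive_sample_flags_py := by
  intro st raw _
  unfold Spec_derive_sample_flags_py derive_sample_flags_py derive_sample_flags_py_alt
    pvFlattenSamples
  set N : PySem.Set String := PySem.Set.ofList
    ((st.filter (fun s => !(PySem.Str.strip s == ""))).map
      (fun s => PySem.Str.lower (PySem.Str.strip s))) with hNdef
  simp only [pvFlagNames, List.map_cons, List.map_nil]
  by_cases hE : PySem.Set.equal N PySem.Set.empty = true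
  · have hnil : N = [] := (pvEqualEmpty N).mp hE
    simp [hnil, PySem.Set.contains, PySem.Set.add, pvAliasesNone, pvAliasesBlood,
      pvAliasesUrine, pvAliasesStool, pvAliasesSputum, pvAliasesNasal, pvAliasesImaging]
  · rw [if_neg hE]
    rw [pvHits_eq N "none" pvAliasesNone pvIndex_none,
      pvHits_eq N "blood" pvAliasesBlood pvIndex_blood,
      pvHits_eq N "urine" pvAliasesUrine pvIndex_urine,
      pvHits_eq N "stool" pvAliasesStool pvIndex_stool,
      pvHits_eq N "sputum" pvAliasesSputum pvIndex_sputum,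
      pvHits_eq N "nasal_swab" pvAliasesNasal pvIndex_nasal,
      pvHits_eq N "imaging" pvAliasesImaging pvIndex_imaging]
    simp only [Bool.not_eq_true] at hE
    simp [show PySem.Set.equal N [] = false from hE]
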